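-- pv_equiv track=rewrite | github.com/cloudy-sfu/pg-dump-to-ER-diagram | schema_to_df.py | _resolve_to_base
-- ===== SOURCE A (Python) =====
-- def _normalize_table_name(name: str) -> str:
--     n = name.lower().strip().replace('"', '')
--     if n.startswith("public."):
--         n = n[len("public."):]
--     return n
--
-- def _resolve_to_base(
--     source: str,
--     cte_lineage: dict[str, dict[str, set[str]]],
--     known_tables: set[str],
--     visited: set[str] | None = None,
-- ) -> set[str]:
--     if visited is None:
--         visited = set()
--     if source in visited:
--         return {source}
--     visited = visited | {source}
--
--     if "." not in source:
--         return {source}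
--
--     parts = source.split(".")
--     if len(parts) == 3:
--         schema, table, col = parts
--         full_table = f"{schema}.{table}"
--         norm = _normalize_table_name(full_table)
--     elif len(parts) == 2:
--         table, col = parts
--         full_table = table
--         norm = _normalize_table_name(table)
--     else:
--         return {source}
--
--     if norm in known_tables:
--         canonical = f"public.{norm}" if "." not in full_table else full_table
--         return {f"{canonical}.{col}"}
--
--     if norm in cte_lineage:
--         cte_col_map = cte_lineage[norm]
--         if col in cte_col_map:
--             resolved = set()
--             for sub in cte_col_map[col]:
--                 resolved.update(_resolve_to_base(sub, cte_lineage,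
--                                                  known_tables, visited))
--             return resolved
--
--     return {source}
-- ===== SOURCE B (Python) =====
-- def _normalize_table_name(name: str) -> str:
--     n = name.lower().strip().replace('"', '')
--     if n.startswith("public."):
--         n = n[len("public."):]
--     return n
--
-- def _classify(node, cte_lineage, known_tables):
--     """Decide what a single source node resolves to, without recursing:
--     ('done', set_of_outputs) for a terminal node, ('expand', sub_sources) for a CTE column."""
--     if "." not in node:
--         return ('done', {node})
--     parts = node.split(".")
--     if len(parts) == 3:
--         schema, table, col = parts
--         full_table = f"{schema}.{table}"
--     elif len(parts) == 2:
--         table, col = parts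
--         full_table = table
--     else:
--         return ('done', {node})
--     norm = _normalize_table_name(full_table)
--     if norm in known_tables:
--         canonical = f"public.{norm}" if "." not in full_table else full_table
--         return ('done', {f"{canonical}.{col}"})
--     colmap = cte_lineage.get(norm)
--     if colmap is not None and col in colmap:
--         return ('expand', colmap[col])
--     return ('done', {node})
--
-- def _resolve_to_base(
--     source: str,
--     cte_lineage: dict[str, dict[str, set[str]]],
--     known_tables: set[str],
--     visited: set[str] | None = None,
-- ) -> set[str]:
--     # Iterative worklist DFS; each frame carries its own path for cycle detection.
--     result = set()
--     stack = [(source, frozenset() if visited is None else frozenset(visited))]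
--     while stack:
--         node, path = stack.pop()
--         if node in path:
--             result.add(node)
--             continue
--         kind, payload = _classify(node, cte_lineage, known_tables)
--         if kind == 'done':
--             result |= payload
--         else:
--             for sub in payload:
--                 stack.append((sub, path | {node}))
--     return result
-- ===== Notes on version B (the rewrite author's own statement) =====
-- stated objective: alternative
-- what changed: A's recursive resolution with per-call set unions is replaced by an iterative worklist DFS: an explicit stack of (node, path) frames plus a separate single-node classification helper, accumulating terminal nodes into one result set.
import Mathlib
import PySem

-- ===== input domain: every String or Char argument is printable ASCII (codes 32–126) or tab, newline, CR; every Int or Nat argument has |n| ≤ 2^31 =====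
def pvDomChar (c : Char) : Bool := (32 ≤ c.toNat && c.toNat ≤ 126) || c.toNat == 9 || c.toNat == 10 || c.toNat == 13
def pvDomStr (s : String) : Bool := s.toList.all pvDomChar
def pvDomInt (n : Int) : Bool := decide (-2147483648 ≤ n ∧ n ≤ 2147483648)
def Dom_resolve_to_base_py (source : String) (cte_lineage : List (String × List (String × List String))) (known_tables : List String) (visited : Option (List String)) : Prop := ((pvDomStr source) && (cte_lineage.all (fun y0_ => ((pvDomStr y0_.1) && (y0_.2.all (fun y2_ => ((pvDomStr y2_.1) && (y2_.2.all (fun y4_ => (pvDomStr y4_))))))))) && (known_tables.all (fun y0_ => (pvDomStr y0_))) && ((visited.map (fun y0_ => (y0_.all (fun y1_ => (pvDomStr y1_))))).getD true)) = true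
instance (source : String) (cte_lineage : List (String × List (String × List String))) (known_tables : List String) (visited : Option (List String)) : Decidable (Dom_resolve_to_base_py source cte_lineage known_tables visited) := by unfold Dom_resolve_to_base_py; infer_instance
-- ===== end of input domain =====

-- B replaces A's recursion by an iterative worklist DFS (explicit stack of (node, path) frames with a
-- separate single-node classification helper); same return value, objective: alternative decomposition.
-- Both Lean ports use a depth budget for termination: along any call chain all sources after the
-- first are pairwise-distinct members of the CTE sub-source pool (the path check stops repeats), so a
-- budget of (pool size) + 2 is never exhausted and the ports compute exactly what their Pythons compute.
-- Python sets are PySem.Sets (distinct elements, first-insertion order); Python's hash iteration order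
-- over 'cte_col_map[col]' is not observable in the returned set, the ports fix the stored list order.

-- ===== PORT A =====
def normalize_table_name_py (name : String) : String :=
  let n := PySem.Str.replace (PySem.Str.strip (PySem.Str.lower name)) "\"" ""
  if PySem.Str.startswith n "public." then PySem.Str.slice n (some 7) none else n

-- the pool of all sub-sources appearing in cte_lineage (used only for the depth budget)
def pvAllSubs (cte : List (String × List (String × List String))) : List String :=
  cte.flatMap (fun e => e.2.flatMap (fun c => c.2))

def resolve_go (cte : List (String × List (String × List String))) (known : List String)
    (fuel : Nat) (source : String) (visited : List String) : List String :=
  match fuel with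
  | 0 => [source]   -- unreachable with the initial budget (see header comment)
  | fuel + 1 =>
    if visited.contains source then [source] else
    if PySem.Str.isIn "." source = false then [source] else
    -- len(parts)==3 / ==2 / else, computing (full_table, col); norm = normalize(full_table) in both
    match (match (PySem.Str.split? source ".").getD [] with
           | [schema, table, col] => some (schema ++ "." ++ table, col)
           | [table, col] => some (table, col)
           | _ => none) with
    | none => [source]
    | some (full_table, col) =>
      if known.contains (normalize_table_name_py full_table) = true then
        [(if PySem.Str.isIn "." full_table = false then
            "public." ++ normalize_table_name_py full_table else full_table) ++ "." ++ col]
      else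
        match PySem.Dict.get? (PySem.Dict.ofList cte) (normalize_table_name_py full_table) with
        | some cte_col_map =>
          match PySem.Dict.get? (PySem.Dict.ofList cte_col_map) col with
          | some subs =>
            subs.foldl (fun resolved sub =>
              PySem.Set.update resolved
                (resolve_go cte known fuel sub (PySem.Set.add visited source))) PySem.Set.empty
          | none => [source]
        | none => [source]

def resolve_to_base_py (source : String) (cte_lineage : List (String × List (String × List String))) (known_tables : List String) (visited : Option (List String)) : List String :=
  resolve_go cte_lineage known_tables ((pvAllSubs cte_lineage).length + 2) source
    (PySem.Set.ofList (visited.getD []))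

-- ===== PORT B =====
inductive PvStep where
  | done (out : List String)
  | expand (subs : List String)
deriving DecidableEq, Repr

-- Source B's _classify_table: the known-table / CTE-lookup decision for an already split node
def pv_classify_tbl (full_table col node : String)
    (cte : List (String × List (String × List String))) (known : List String) : PvStep :=
  if known.contains (normalize_table_name_py full_table) = true then
    .done [(if PySem.Str.isIn "." full_table = false then
              "public." ++ normalize_table_name_py full_table else full_table) ++ "." ++ col]
  else
    match PySem.Dict.get? (PySem.Dict.ofList cte) (normalize_table_name_py full_table) with
    | some colmap =>
      match PySem.Dict.get? (PySem.Dict.ofList colmap) col with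
      | some subs => .expand subs
      | none => .done [node]
    | none => .done [node]

-- Source B's _classify: resolve a single node without recursing
def pv_classify (node : String) (cte : List (String × List (String × List String)))
    (known : List String) : PvStep :=
  if PySem.Str.isIn "." node = false then .done [node] else
  match (PySem.Str.split? node ".").getD [] with
  | [schema, table, col] => pv_classify_tbl (schema ++ "." ++ table) col node cte known
  | [table, col] => pv_classify_tbl table col node cte known
  | _ => .done [node]

-- termination helpers for the worklist loop (cited in pv_loop's termination proof)
lemma pv_length_le_flatMap {α β : Type} (l : List α) (a : α) (f : α → List β) (h : a ∈ l) :
    (f a).length ≤ (l.flatMap f).length := by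
  induction l with
  | nil => cases h
  | cons x xs ih =>
    rw [List.flatMap_cons, List.length_append]
    rcases List.mem_cons.mp h with h1 | h2
    · subst h1; omega
    · have := ih h2; omega

lemma pv_mem_items_foldl {ν : Type} (l : List (String × ν)) (d : PySem.Dict String ν)
    (p : String × ν) (h : p ∈ (l.foldl (fun d q => d.insert q.1 q.2) d).items) :
    p ∈ d.items ∨ p ∈ l := by
  induction l generalizing d with
  | nil => exact Or.inl h
  | cons q l ih =>
    rcases ih _ h with h1 | h2
    · rcases (PySem.Dict.mem_items_insert _ _ _ _).mp h1 with h3 | h4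
      · exact Or.inr (by simp [h3])
      · exact Or.inl h4.1
    · exact Or.inr (List.mem_cons_of_mem _ h2)

lemma pv_get?_ofList_mem {ν : Type} (l : List (String × ν)) (k : String) (v : ν)
    (h : PySem.Dict.get? (PySem.Dict.ofList l) k = some v) : (k, v) ∈ l := by
  have hm : (k, v) ∈ (l.foldl (fun d q => d.insert q.1 q.2) PySem.Dict.empty).items :=
    PySem.Dict.mem_items_of_get?_eq_some _ h
  rcases pv_mem_items_foldl l _ _ hm with h1 | h2
  · simp [PySem.Dict.empty] at h1
  · exact h2

lemma pv_classify_tbl_expand_le (full_table col node : String)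
    (cte : List (String × List (String × List String))) (known : List String)
    (subs : List String) (h : pv_classify_tbl full_table col node cte known = .expand subs) :
    subs.length ≤ (pvAllSubs cte).length := by
  unfold pv_classify_tbl at h
  split at h
  · cases h
  · split at h
    · rename_i colmap hc
      split at h
      · rename_i subs' hs
        cases h
        have h1 := pv_get?_ofList_mem _ _ _ hc
        have h2 := pv_get?_ofList_mem _ _ _ hs
        calc subs.length
            ≤ (colmap.flatMap (fun c => c.2)).length :=
              pv_length_le_flatMap colmap (_, subs) (fun c => c.2) h2
          _ ≤ (pvAllSubs cte).length :=
              pv_length_le_flatMap cte (_, colmap) (fun e => e.2.flatMap (fun c => c.2)) h1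
      · cases h
    · cases h

lemma pv_classify_expand_le (node : String) (cte : List (String × List (String × List String)))
    (known : List String) (subs : List String) (h : pv_classify node cte known = .expand subs) :
    subs.length ≤ (pvAllSubs cte).length := by
  unfold pv_classify at h
  split at h
  · cases h
  · split at h
    · exact pv_classify_tbl_expand_le _ _ _ _ _ _ h
    · exact pv_classify_tbl_expand_le _ _ _ _ _ _ h
    · cases h

def pv_loop (cte : List (String × List (String × List String))) (known : List String)
    (frames : List (String × List String × Nat)) (acc : List String) : List String :=
  match frames with
  | [] => acc
  | (node, path, d) :: rest =>
    if path.contains node then pv_loop cte known rest (PySem.Set.union acc [node])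
    else match d with
      | 0 => pv_loop cte known rest (PySem.Set.union acc [node])  -- budget exhausted: unreachable with the initial budget
      | d + 1 =>
        match h : pv_classify node cte known with
        | .done out => pv_loop cte known rest (PySem.Set.union acc out)
        | .expand subs =>
          pv_loop cte known (subs.map (fun sub => (sub, PySem.Set.add path node, d)) ++ rest) acc
termination_by (frames.map (fun f => ((pvAllSubs cte).length + 1) ^ f.2.2)).sum
decreasing_by
  · simp only [List.map_cons, List.sum_cons]
    have h1 : 0 < ((pvAllSubs cte).length + 1) ^ d := Nat.pow_pos (by omega)
    omega
  · simp only [List.map_cons, List.sum_cons, pow_zero]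
    omega
  · simp only [List.map_cons, List.sum_cons, Nat.succ_eq_add_one]
    have h1 : 0 < ((pvAllSubs cte).length + 1) ^ (d + 1) := Nat.pow_pos (by omega)
    omega
  · have hle := pv_classify_expand_le node cte known subs h
    have hconst : ∀ (ss : List String),
        ((ss.map (fun sub => (sub, PySem.Set.add path node, d))).map
          (fun f => ((pvAllSubs cte).length + 1) ^ f.2.2)).sum
        = ss.length * ((pvAllSubs cte).length + 1) ^ d := by
      intro ss
      induction ss with
      | nil => simp
      | cons s ss ihs =>
        simp only [List.map_cons, List.sum_cons, List.length_cons] at *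
        rw [ihs]; ring
    rw [List.map_append, List.sum_append, List.map_cons, List.sum_cons, hconst]
    have hX : 0 < ((pvAllSubs cte).length + 1) ^ d := Nat.pow_pos (by omega)
    have hlt : subs.length * ((pvAllSubs cte).length + 1) ^ d
        < ((pvAllSubs cte).length + 1) ^ (d + 1) := by
      calc subs.length * ((pvAllSubs cte).length + 1) ^ d
          ≤ (pvAllSubs cte).length * ((pvAllSubs cte).length + 1) ^ d :=
            Nat.mul_le_mul_right _ hle
        _ < ((pvAllSubs cte).length + 1) * ((pvAllSubs cte).length + 1) ^ d :=
            (Nat.mul_lt_mul_right hX).mpr (by omega)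
        _ = ((pvAllSubs cte).length + 1) ^ (d + 1) := by rw [pow_succ]; ring
    exact Nat.add_lt_add_right hlt _

def resolve_to_base_py_alt (source : String) (cte_lineage : List (String × List (String × List String))) (known_tables : List String) (visited : Option (List String)) : List String :=
  pv_loop cte_lineage known_tables
    [(source, PySem.Set.ofList (visited.getD []), (pvAllSubs cte_lineage).length + 2)] []

-- ===== PRECONDITION & SPEC =====
def Spec_resolve_to_base_py (source : String) (cte_lineage : List (String × List (String × List String))) (known_tables : List String) (visited : Option (List String)) (out : List String) : Prop := out = resolve_to_base_py_alt source cte_lineage known_tables visited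
instance (source : String) (cte_lineage : List (String × List (String × List String))) (known_tables : List String) (visited : Option (List String)) (out : List String) : Decidable (Spec_resolve_to_base_py source cte_lineage known_tables visited out) := by unfold Spec_resolve_to_base_py; infer_instance

-- ===== CLAIM (what is proved, stated in full; the proofs are below) =====
def Claim_equal_resolve_to_base_py : Prop := ∀ (source : String) (cte_lineage : List (String × List (String × List String))) (known_tables : List String) (visited : Option (List String)), Dom_resolve_to_base_py source cte_lineage known_tables visited → Spec_resolve_to_base_py source cte_lineage known_tables visited (resolve_to_base_py source cte_lineage known_tables visited)

-- ===== LEMMAS AND PROOFS =====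

-- Set.update algebra: dropping already-present elements, collapsing duplicates, associativity
lemma pv_update_single (s : List String) (x : String) :
    PySem.Set.update s [x] = PySem.Set.add s x := rfl

lemma pv_update_filter (s c : List String) (p : String → Bool)
    (h : ∀ x ∈ c, p x = false → x ∈ s) :
    PySem.Set.update s (c.filter p) = PySem.Set.update s c := by
  induction c generalizing s with
  | nil => rfl
  | cons x c ih =>
    by_cases hp : p x = true
    · rw [List.filter_cons_of_pos hp, PySem.Set.update_cons, PySem.Set.update_cons]
      exact ih _ (fun y hy hpy =>
        (PySem.Set.mem_add _ _ _).mpr (Or.inl (h y (List.mem_cons_of_mem _ hy) hpy)))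
    · have hx : x ∈ s := h x List.mem_cons_self (by simpa using hp)
      rw [List.filter_cons_of_neg (by simpa using hp), PySem.Set.update_cons,
        PySem.Set.add_of_mem hx]
      exact ih _ (fun y hy hpy => h y (List.mem_cons_of_mem _ hy) hpy)

lemma pv_update_ofList (s c : List String) :
    PySem.Set.update s (PySem.Set.ofList c) = PySem.Set.update s c := by
  induction c using List.reverseRecOn generalizing s with
  | nil => rfl
  | append_singleton c x ih =>
    rw [PySem.Set.ofList_append_singleton, PySem.Set.add_eq_ite]
    by_cases hx : x ∈ PySem.Set.ofList c
    · rw [if_pos hx, ih, PySem.Set.update_append]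
      have hxc : x ∈ c := (PySem.Set.mem_ofList _ _).mp hx
      rw [pv_update_single, PySem.Set.add_of_mem ((PySem.Set.mem_update _ _ _).mpr (Or.inr hxc))]
    · rw [if_neg hx, PySem.Set.update_append, PySem.Set.update_append, ih]

lemma pv_update_assoc (a b c : List String) :
    PySem.Set.update (PySem.Set.update a b) c = PySem.Set.update a (PySem.Set.update b c) := by
  rw [PySem.Set.update_eq_append_filter b c, PySem.Set.update_append,
    pv_update_filter (PySem.Set.update a b) (PySem.Set.ofList c)
      (fun y => !(PySem.Set.contains b y))
      (fun y _ hy => (PySem.Set.mem_update _ _ _).mpr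
        (Or.inr ((PySem.Set.contains_iff _ _).mp (by simpa using hy)))),
    pv_update_ofList]

lemma pv_update_foldl_shift (acc : List String) (subs : List String) (f : String → List String) :
    PySem.Set.update acc (subs.foldl (fun r x => PySem.Set.update r (f x)) PySem.Set.empty)
      = subs.foldl (fun r x => PySem.Set.update r (f x)) acc := by
  induction subs using List.reverseRecOn with
  | nil => rfl
  | append_singleton subs x ih =>
    rw [List.foldl_append, List.foldl_append]
    simp only [List.foldl]
    rw [← pv_update_assoc, ih]

-- the result of A's recursion is a set (distinct elements)
lemma pv_go_nodup (cte : List (String × List (String × List String))) (known : List String) :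
    ∀ (fuel : Nat) (source : String) (visited : List String),
      (resolve_go cte known fuel source visited).Nodup := by
  intro fuel
  induction fuel with
  | zero => intro source visited; simp [resolve_go]
  | succ fuel ih =>
    intro source visited
    rw [resolve_go]
    split
    · simp
    · split
      · simp
      · split
        · simp
        · rename_i full_table col
          split
          · simp
          · split
            · split
              · have haux : ∀ (subs : List String) (r : List String), r.Nodup →
                    (subs.foldl (fun resolved sub =>
                      PySem.Set.update resolved (resolve_go cte known fuel sub
                        (PySem.Set.add visited source))) r).Nodup := by
                  intro subs
                  induction subs with
                  | nil => intro r hr; exact hr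
                  | cons s ss ihs =>
                    intro r hr
                    exact ihs _ (PySem.Set.nodup_update _ _ hr)
                exact haux _ _ List.nodup_nil
              · simp
            · simp

-- A's known-table / CTE tail coincides with the dispatch on B's _classify_table
lemma pv_tbl_eq (cte : List (String × List (String × List String))) (known : List String)
    (d : Nat) (full col node : String) (vis' : List String) :
    (if known.contains (normalize_table_name_py full) = true then
       [(if PySem.Str.isIn "." full = false then
           "public." ++ normalize_table_name_py full else full) ++ "." ++ col]
     else
       match PySem.Dict.get? (PySem.Dict.ofList cte) (normalize_table_name_py full) with
       | some cm =>
         match PySem.Dict.get? (PySem.Dict.ofList cm) col with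
         | some subs => subs.foldl (fun r sub =>
             PySem.Set.update r (resolve_go cte known d sub vis')) PySem.Set.empty
         | none => [node]
       | none => [node])
    = match pv_classify_tbl full col node cte known with
      | .done out => out
      | .expand subs => subs.foldl (fun r sub =>
          PySem.Set.update r (resolve_go cte known d sub vis')) PySem.Set.empty := by
  unfold pv_classify_tbl
  by_cases hk : known.contains (normalize_table_name_py full) = true
  · rw [if_pos hk, if_pos hk]
  · rw [if_neg hk, if_neg hk]
    rcases hg : PySem.Dict.get? (PySem.Dict.ofList cte) (normalize_table_name_py full) with _ | cm
    · rfl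
    · dsimp only
      rcases hg2 : PySem.Dict.get? (PySem.Dict.ofList cm) col with _ | subs
      · rfl
      · rfl

-- B's single-node step agrees with the body of A's recursion step
lemma pv_go_succ_eq (cte : List (String × List (String × List String))) (known : List String)
    (d : Nat) (node : String) (path : List String) (h : path.contains node = false) :
    resolve_go cte known (d + 1) node path =
      match pv_classify node cte known with
      | .done out => out
      | .expand subs => subs.foldl (fun r sub =>
          PySem.Set.update r (resolve_go cte known d sub (PySem.Set.add path node))) PySem.Set.empty := by
  rw [resolve_go, pv_classify, if_neg (by rw [h]; simp)]
  by_cases hdot : PySem.Str.isIn "." node = false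
  · rw [if_pos hdot, if_pos hdot]
  · rw [if_neg hdot, if_neg hdot]
    rcases hp : (PySem.Str.split? node ".").getD [] with _ | ⟨s1, _ | ⟨s2, _ | ⟨s3, _ | l⟩⟩⟩
    · rfl
    · rfl
    · exact pv_tbl_eq cte known d s1 s2 node (PySem.Set.add path node)
    · exact pv_tbl_eq cte known d (s1 ++ "." ++ s2) s3 node (PySem.Set.add path node)
    · rfl

-- the loop's equations
lemma pv_loop_nil (cte : List (String × List (String × List String))) (known : List String)
    (acc : List String) : pv_loop cte known [] acc = acc := by
  rw [pv_loop]

-- processing one frame adds exactly what A's recursion returns for it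
lemma pv_loop_frame (cte : List (String × List (String × List String))) (known : List String) :
    ∀ (d : Nat) (node : String) (path : List String)
      (rest : List (String × List String × Nat)) (acc : List String),
      pv_loop cte known ((node, path, d) :: rest) acc
        = pv_loop cte known rest (PySem.Set.update acc (resolve_go cte known d node path)) := by
  intro d
  induction d with
  | zero =>
    intro node path rest acc
    rw [pv_loop]
    split <;> rw [resolve_go] <;> rfl
  | succ d ih =>
    intro node path rest acc
    rw [pv_loop]
    split
    · rename_i hv
      rw [resolve_go, if_pos hv]
      rfl
    · rename_i hv
      rw [pv_go_succ_eq cte known d node path (by simpa using hv)]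
      have hframes : ∀ (subs : List String) (rest : List (String × List String × Nat))
          (acc : List String),
          pv_loop cte known (subs.map (fun sub => (sub, PySem.Set.add path node, d)) ++ rest) acc
            = pv_loop cte known rest (subs.foldl (fun r sub =>
                PySem.Set.update r (resolve_go cte known d sub (PySem.Set.add path node))) acc) := by
        intro subs
        induction subs with
        | nil => intro rest acc; rfl
        | cons s ss ihs =>
          intro rest acc
          rw [List.map_cons, List.cons_append, ih, ihs, List.foldl_cons]
      split
      · rename_i out heq
        rw [heq]
        rfl
      · rename_i subs heq
        rw [heq]
        show pv_loop cte known (subs.map (fun sub => (sub, PySem.Set.add path node, d)) ++ rest) acc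
          = pv_loop cte known rest (PySem.Set.update acc (subs.foldl (fun r sub =>
              PySem.Set.update r (resolve_go cte known d sub (PySem.Set.add path node)))
              PySem.Set.empty))
        rw [hframes, pv_update_foldl_shift]

-- ===== VERDICT (by name: the statement is the Claim_ definition above) =====
theorem resolve_to_base_py_spec : Claim_equal_resolve_to_base_py := by
  intro source cte known visited _
  unfold Spec_resolve_to_base_py resolve_to_base_py resolve_to_base_py_alt
  rw [pv_loop_frame, pv_loop_nil, PySem.Set.update_nil_left,
    PySem.Set.ofList_eq_self_of_nodup _ (pv_go_nodup _ _ _ _ _)]
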